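-- pv_equiv track=rewrite | github.com/GML-FMGroup/creative_claw | src/production/short_video/prompt_catalog.py | _normalize_rendered_prompt
-- ===== SOURCE A (Python) =====
-- def _normalize_rendered_prompt(prompt: str) -> str:
--     """Normalize prompt whitespace while preserving paragraph boundaries."""
--     lines = [line.rstrip() for line in str(prompt or "").strip().splitlines()]
--     normalized_lines: list[str] = []
--     previous_blank = False
--     for line in lines:
--         blank = not line.strip()
--         if blank and previous_blank:
--             continue
--         normalized_lines.append(line)
--         previous_blank = blank
--     return "\n".join(normalized_lines).strip()
-- ===== SOURCE B (Python) =====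
-- def _normalize_rendered_prompt(prompt: str) -> str:
--     """Normalize prompt whitespace while preserving paragraph boundaries."""
--     text = "\n".join(line.rstrip() for line in str(prompt or "").strip().splitlines())
--     out = []
--     run = 0
--     for ch in text:
--         if ch == "\n":
--             run += 1
--         else:
--             out.append("\n" * min(run, 2))
--             out.append(ch)
--             run = 0
--     return "".join(out).strip()
-- ===== Notes on version B (the rewrite author's own statement) =====
-- stated objective: alternative
-- what changed: Replaces A's stateful previous_blank line-skipping loop with joining the rstripped lines into one text and collapsing every run of 2+ newlines to exactly two in a single character-level scan.
import Mathlib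
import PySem

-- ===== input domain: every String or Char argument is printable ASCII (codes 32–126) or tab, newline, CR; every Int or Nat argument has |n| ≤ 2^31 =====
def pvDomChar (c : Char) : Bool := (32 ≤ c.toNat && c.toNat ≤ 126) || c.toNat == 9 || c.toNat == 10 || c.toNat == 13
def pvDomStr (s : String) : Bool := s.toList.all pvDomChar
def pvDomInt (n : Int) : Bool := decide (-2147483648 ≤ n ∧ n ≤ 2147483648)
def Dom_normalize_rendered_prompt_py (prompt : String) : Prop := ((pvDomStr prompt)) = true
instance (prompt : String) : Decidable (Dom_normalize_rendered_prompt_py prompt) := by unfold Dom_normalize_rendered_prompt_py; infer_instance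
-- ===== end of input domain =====

-- B joins the rstripped lines into one text and collapses every run of 2+ newlines to exactly
-- two in a single character scan, instead of A's stateful previous_blank line-skipping loop;
-- same return value (alternative decomposition, no speed claim).

-- ===== PORT A =====
def pvStepA (st : List String × Bool) (line : String) : List String × Bool :=
  let blank := PySem.Str.strip line == ""
  if blank && st.2 then st else (st.1 ++ [line], blank)

def normalize_rendered_prompt_py (prompt : String) : String :=
  let base := if prompt == "" then "" else prompt
  let lines := (PySem.Str.splitlines (PySem.Str.strip base)).map PySem.Str.rstrip
  let st := lines.foldl pvStepA ([], false)
  PySem.Str.strip (PySem.Str.join "\n" st.1)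

-- ===== PORT B =====
-- Source B appends string pieces ("\n" * min(run, 2) and the single char) to `out` and finally
-- "".join(out): ported as one accumulated char list — "".join of the pieces is exactly their
-- concatenation.
def pvScan (st : List Char × Nat) (c : Char) : List Char × Nat :=
  if c == '\n' then (st.1, st.2 + 1)
  else (st.1 ++ List.replicate (min st.2 2) '\n' ++ [c], 0)

def normalize_rendered_prompt_py_alt (prompt : String) : String :=
  let base := if prompt == "" then "" else prompt
  let text := PySem.Str.join "\n" ((PySem.Str.splitlines (PySem.Str.strip base)).map PySem.Str.rstrip)
  let st := text.toList.foldl pvScan ([], 0)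
  PySem.Str.strip (String.ofList st.1)

-- ===== PRECONDITION & SPEC =====
def Spec_normalize_rendered_prompt_py (prompt : String) (out : String) : Prop := out = normalize_rendered_prompt_py_alt prompt
instance (prompt : String) (out : String) : Decidable (Spec_normalize_rendered_prompt_py prompt out) := by unfold Spec_normalize_rendered_prompt_py; infer_instance

-- ===== CLAIM (what is proved, stated in full; the proofs are below) =====
def Claim_equal_normalize_rendered_prompt_py : Prop := ∀ (prompt : String), Dom_normalize_rendered_prompt_py prompt → Spec_normalize_rendered_prompt_py prompt (normalize_rendered_prompt_py prompt)

-- ===== LEMMAS AND PROOFS =====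

-- A's loop at the level of char lists
def pvCollapse : Bool → List (List Char) → List (List Char)
  | _, [] => []
  | pb, l :: ls =>
    if (PySem.Chars.strip l).isEmpty && pb then pvCollapse pb ls
    else l :: pvCollapse (PySem.Chars.strip l).isEmpty ls

-- A's joined output, written with explicit separators: pvAT is the tail (every element preceded
-- by '\n'), pvHA the whole join of pvCollapse, assuming blank lines are literally []
def pvAT : Bool → List (List Char) → List Char
  | _, [] => []
  | pb, l :: ls =>
    if l.isEmpty then (if pb then pvAT true ls else '\n' :: pvAT true ls)
    else '\n' :: (l ++ pvAT false ls)

def pvHA : List (List Char) → List Char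
  | [] => []
  | l :: ls => if l.isEmpty then pvAT true ls else l ++ pvAT false ls

-- B's scan at the level of the line list, r = pending newline run
def pvST : Nat → List (List Char) → List Char
  | _, [] => []
  | r, l :: ls =>
    if l.isEmpty then pvST (r + 1) ls
    else List.replicate (min r 2) '\n' ++ l ++ pvST 1 ls

-- basic char lemmas
theorem pv_head_false {p : Char → Bool} {l : List Char} {a : Char} {t : List Char}
    (h : List.dropWhile p l = a :: t) : p a = false := by
  have h2 : List.dropWhile p l ≠ [] := by simp [h]
  have h3 := List.head_dropWhile_not p h2
  have h4 : (List.dropWhile p l).head h2 = a := by simp [h]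
  rwa [h4] at h3

theorem pv_strip_cons_ws {c : Char} (s : List Char) (h : PySem.Chars.isspace c = true) :
    PySem.Chars.strip (c :: s) = PySem.Chars.strip s := by
  simp [PySem.Chars.strip, PySem.Chars.lstrip, h]

theorem pv_rstrip_append_ws {c : Char} (s : List Char) (h : PySem.Chars.isspace c = true) :
    PySem.Chars.rstrip (s ++ [c]) = PySem.Chars.rstrip s := by
  simp [PySem.Chars.rstrip, List.reverse_append, h]

theorem pv_strip_append_ws {c : Char} (s : List Char) (h : PySem.Chars.isspace c = true) :
    PySem.Chars.strip (s ++ [c]) = PySem.Chars.strip s := by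
  simp only [PySem.Chars.strip, PySem.Chars.lstrip]
  rw [List.dropWhile_append]
  by_cases h1 : (List.dropWhile PySem.Chars.isspace s).isEmpty
  · simp [h, List.isEmpty_iff.mp h1]
  · simp only [h1]
    exact pv_rstrip_append_ws _ h

theorem pv_strip_append_nl (s : List Char) (k : Nat) :
    PySem.Chars.strip (s ++ List.replicate k '\n') = PySem.Chars.strip s := by
  induction k generalizing s with
  | zero => simp
  | succ n ih =>
    rw [List.replicate_succ', ← List.append_assoc, pv_strip_append_ws _ (by decide)]
    exact ih s

theorem pv_rstrip_eq_nil_iff (u : List Char) :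
    PySem.Chars.rstrip u = [] ↔ ∀ x ∈ u, PySem.Chars.isspace x = true := by
  simp [PySem.Chars.rstrip, List.dropWhile_eq_nil_iff]

theorem pv_rstrip_idem (s : List Char) :
    PySem.Chars.rstrip (PySem.Chars.rstrip s) = PySem.Chars.rstrip s := by
  simp [PySem.Chars.rstrip, List.dropWhile_idempotent]

theorem pv_rstrip_of_strip_nil {t : List Char} (h : PySem.Chars.strip t = []) :
    PySem.Chars.rstrip t = [] := by
  have h1 : ∀ x ∈ PySem.Chars.lstrip t, PySem.Chars.isspace x = true :=
    (pv_rstrip_eq_nil_iff _).mp h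
  have h2 : PySem.Chars.lstrip t = [] := by
    cases hd : PySem.Chars.lstrip t with
    | nil => rfl
    | cons a tl =>
      have hfalse : PySem.Chars.isspace a = false := pv_head_false hd
      have htrue := h1 a (by rw [hd]; exact List.mem_cons_self)
      rw [htrue] at hfalse; cases hfalse
  have h3 : ∀ x ∈ t, PySem.Chars.isspace x = true := by
    have := List.dropWhile_eq_nil_iff.mp h2
    exact this
  exact (pv_rstrip_eq_nil_iff _).mpr h3

theorem pv_hb (x : List Char)
    (h : (PySem.Chars.strip (PySem.Chars.rstrip x)).isEmpty = true) :
    PySem.Chars.rstrip x = [] := by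
  have h1 : PySem.Chars.strip (PySem.Chars.rstrip x) = [] := List.isEmpty_iff.mp h
  have h2 := pv_rstrip_of_strip_nil h1
  rwa [pv_rstrip_idem] at h2

-- blank-test bridge
theorem pv_blank_bridge (l : String) :
    (PySem.Str.strip l == "") = (PySem.Chars.strip l.toList).isEmpty := by
  show (String.ofList (PySem.Chars.strip l.toList) == "") = _
  rw [show ("" : String) = String.ofList [] from rfl]
  cases h : PySem.Chars.strip l.toList <;> simp [h]

theorem pv_join_cons (sep x : List Char) (xs : List (List Char)) :
    PySem.Chars.join sep (x :: xs) =
      x ++ (if xs.isEmpty then [] else sep ++ PySem.Chars.join sep xs) := by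
  cases xs with
  | nil => simp [PySem.Chars.join_singleton]
  | cons y ys => simp [PySem.Chars.join_cons_cons]

theorem pv_nl_toList : ("\n" : String).toList = ['\n'] := by decide

-- A-side: the fold equals pvCollapse
theorem pv_foldA (ls : List String) : ∀ (acc : List String) (pb : Bool),
    ((ls.foldl pvStepA (acc, pb)).1).map String.toList
      = acc.map String.toList ++ pvCollapse pb (ls.map String.toList) := by
  induction ls with
  | nil => intro acc pb; simp [pvCollapse]
  | cons l ls ih =>
    intro acc pb
    rw [List.foldl_cons]
    have hbl := pv_blank_bridge l
    cases hB : (PySem.Chars.strip l.toList).isEmpty with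
    | false =>
      rw [hB] at hbl
      simp only [pvStepA, hbl, Bool.false_and, Bool.false_eq_true, if_false]
      rw [ih]
      simp only [List.map_cons, pvCollapse, hB, Bool.false_and, Bool.false_eq_true, if_false,
        List.map_append, List.map_cons, List.map_nil]
      simp [List.append_assoc]
    | true =>
      rw [hB] at hbl
      cases pb with
      | true =>
        simp only [pvStepA, hbl, Bool.true_and, if_true]
        rw [ih]
        simp [pvCollapse, hB]
      | false =>
        simp only [pvStepA, hbl, Bool.and_false, Bool.false_eq_true, if_false]
        rw [ih]
        simp only [List.map_cons, pvCollapse, hB, Bool.true_and, Bool.false_eq_true, if_false,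
          List.map_append, List.map_cons, List.map_nil]
        simp [List.append_assoc]

theorem pv_nonblank_isEmpty {l : List Char}
    (h : (PySem.Chars.strip l).isEmpty = false) : l.isEmpty = false := by
  cases l with
  | nil => simp [PySem.Chars.strip, PySem.Chars.lstrip, PySem.Chars.rstrip] at h
  | cons a t => rfl

-- join of pvCollapse written via pvAT / pvHA (blank lines are [])
theorem pv_AT_spec (ls : List (List Char))
    (hb : ∀ l ∈ ls, (PySem.Chars.strip l).isEmpty = true → l = []) : ∀ pb,
    pvAT pb ls = if (pvCollapse pb ls).isEmpty then []
                 else '\n' :: PySem.Chars.join ['\n'] (pvCollapse pb ls) := by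
  induction ls with
  | nil => intro pb; simp [pvAT, pvCollapse]
  | cons l ls ih =>
    intro pb
    have hb' : ∀ x ∈ ls, (PySem.Chars.strip x).isEmpty = true → x = [] := by
      intro x hx; exact hb x (by simp [hx])
    cases hB : (PySem.Chars.strip l).isEmpty with
    | false =>
      have hl : l.isEmpty = false := pv_nonblank_isEmpty hB
      simp only [pvAT, pvCollapse, hB, hl, Bool.false_and, Bool.false_eq_true, if_false,
        List.isEmpty_cons]
      rw [pv_join_cons, ih hb' false]
      cases hc : (pvCollapse false ls).isEmpty <;> simp [hc]
    | true =>
      have hl : l = [] := hb l (by simp) hB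
      subst hl
      cases pb with
      | true =>
        simp only [pvAT, pvCollapse, hB, Bool.and_true, if_true, List.isEmpty_nil]
        exact ih hb' true
      | false =>
        simp only [pvAT, pvCollapse, hB, Bool.and_false, Bool.false_eq_true, if_false,
          List.isEmpty_nil, if_true, List.isEmpty_cons]
        rw [pv_join_cons, ih hb' true]
        cases hc : (pvCollapse true ls).isEmpty <;> simp [hc]

theorem pv_HA_spec (ls : List (List Char))
    (hb : ∀ l ∈ ls, (PySem.Chars.strip l).isEmpty = true → l = []) :
    PySem.Chars.join ['\n'] (pvCollapse false ls) = pvHA ls := by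
  cases ls with
  | nil => simp [pvCollapse, pvHA]
  | cons l ls =>
    have hb' : ∀ x ∈ ls, (PySem.Chars.strip x).isEmpty = true → x = [] := by
      intro x hx; exact hb x (by simp [hx])
    cases hB : (PySem.Chars.strip l).isEmpty with
    | false =>
      have hl : l.isEmpty = false := pv_nonblank_isEmpty hB
      simp only [pvCollapse, pvHA, hB, hl, Bool.false_and, Bool.false_eq_true, if_false]
      rw [pv_join_cons, pv_AT_spec ls hb' false]
      cases hc : (pvCollapse false ls).isEmpty <;> simp [hc]
    | true =>
      have hl : l = [] := hb l (by simp) hB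
      subst hl
      simp only [pvCollapse, pvHA, hB, Bool.and_false, Bool.false_eq_true, if_false,
        List.isEmpty_nil, if_true]
      rw [pv_join_cons, pv_AT_spec ls hb' true]
      cases hc : (pvCollapse true ls).isEmpty <;> simp [hc]

-- B-side: the char fold over a newline-free chunk
theorem pv_scan_nonl (cs : List Char) : ∀ (acc : List Char), '\n' ∉ cs →
    cs.foldl pvScan (acc, 0) = (acc ++ cs, 0) := by
  induction cs with
  | nil => intro acc _; simp
  | cons c cs ih =>
    intro acc hn
    have hn2 := hn
    simp only [List.mem_cons, not_or] at hn2
    have hc : (c == '\n') = false := beq_eq_false_iff_ne.mpr (fun h => hn2.1 h.symm)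
    rw [List.foldl_cons]
    simp only [pvScan, hc, Bool.false_eq_true, if_false, Nat.zero_min,
      List.replicate_zero, List.append_nil]
    rw [ih _ hn2.2]
    simp

theorem pv_scan_line (l : List Char) (acc : List Char) (r : Nat)
    (hne : l ≠ []) (hn : '\n' ∉ l) :
    l.foldl pvScan (acc, r) = (acc ++ List.replicate (min r 2) '\n' ++ l, 0) := by
  cases l with
  | nil => cases hne rfl
  | cons c cs =>
    have hn2 := hn
    simp only [List.mem_cons, not_or] at hn2
    have hc : (c == '\n') = false := beq_eq_false_iff_ne.mpr (fun h => hn2.1 h.symm)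
    rw [List.foldl_cons]
    simp only [pvScan, hc, Bool.false_eq_true, if_false]
    rw [pv_scan_nonl cs _ hn2.2]
    simp

-- B-side: the char fold over the joined lines equals pvST
theorem pv_scan_join (ls : List (List Char)) : ∀ (acc : List Char) (r : Nat),
    (∀ l ∈ ls, '\n' ∉ l) →
    ∃ r', (PySem.Chars.join ['\n'] ls).foldl pvScan (acc, r) = (acc ++ pvST r ls, r') := by
  induction ls with
  | nil => intro acc r _; exact ⟨r, by simp [PySem.Chars.join_nil, pvST]⟩
  | cons l ls ih =>
    intro acc r hn
    have hn' : ∀ x ∈ ls, '\n' ∉ x := fun x hx => hn x (by simp [hx])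
    rw [pv_join_cons]
    cases hl : l.isEmpty with
    | true =>
      have hl0 : l = [] := List.isEmpty_iff.mp hl
      subst hl0
      cases hls : ls.isEmpty with
      | true =>
        have h0 : ls = [] := List.isEmpty_iff.mp hls
        subst h0
        exact ⟨r, by simp [pvST]⟩
      | false =>
        simp only [hls, Bool.false_eq_true, if_false, List.nil_append,
          List.singleton_append, List.foldl_cons]
        have hstep : pvScan (acc, r) '\n' = (acc, r + 1) := by simp [pvScan]
        rw [hstep]
        obtain ⟨r', hr⟩ := ih acc (r + 1) hn'
        exact ⟨r', by rw [hr]; simp [pvST]⟩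
    | false =>
      have hlne : l ≠ [] := fun h => by subst h; simp at hl
      have hnl : '\n' ∉ l := hn l (by simp)
      cases hls : ls.isEmpty with
      | true =>
        have h0 : ls = [] := List.isEmpty_iff.mp hls
        subst h0
        simp only [List.isEmpty_nil, if_true, List.append_nil]
        refine ⟨0, ?_⟩
        rw [pv_scan_line l acc r hlne hnl]
        simp [pvST, hl]
      | false =>
        simp only [hls, Bool.false_eq_true, if_false]
        rw [List.foldl_append, pv_scan_line l acc r hlne hnl]
        simp only [List.singleton_append, List.foldl_cons]
        have hstep : pvScan (acc ++ List.replicate (min r 2) '\n' ++ l, 0) '\n'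
            = (acc ++ List.replicate (min r 2) '\n' ++ l, 1) := by simp [pvScan]
        rw [hstep]
        obtain ⟨r', hr⟩ := ih _ 1 hn'
        refine ⟨r', ?_⟩
        rw [hr]
        simp [pvST, hl, List.append_assoc]

-- comparison lemmas
theorem pv_ST_ge2 (ls : List (List Char)) : ∀ r, 2 ≤ r → pvST r ls = pvST 2 ls := by
  induction ls with
  | nil => intro r _; rfl
  | cons l ls ih =>
    intro r hr
    cases hl : l.isEmpty with
    | true =>
      simp only [pvST, hl, if_true]
      rw [ih (r + 1) (by omega), ih 3 (by omega)]
    | false =>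
      simp only [pvST, hl, Bool.false_eq_true, if_false]
      have : min r 2 = min 2 2 := by omega
      rw [this]

theorem pv_T (ls : List (List Char))
    (hb : ∀ l ∈ ls, (PySem.Chars.strip l).isEmpty = true → l = []) :
    (∃ k, pvAT false ls = pvST 1 ls ++ List.replicate k '\n') ∧
    (∃ k, '\n' :: pvAT true ls = pvST 2 ls ++ List.replicate k '\n') := by
  induction ls with
  | nil => exact ⟨⟨0, by simp [pvAT, pvST]⟩, ⟨1, by simp [pvAT, pvST]⟩⟩
  | cons l ls ih =>
    have hb' : ∀ x ∈ ls, (PySem.Chars.strip x).isEmpty = true → x = [] := by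
      intro x hx; exact hb x (by simp [hx])
    obtain ⟨⟨k1, h1⟩, ⟨k2, h2⟩⟩ := ih hb'
    cases hB : (PySem.Chars.strip l).isEmpty with
    | true =>
      have hl : l = [] := hb l (by simp) hB
      subst hl
      constructor
      · exact ⟨k2, by simpa [pvAT, pvST] using h2⟩
      · refine ⟨k2, ?_⟩
        simp only [pvAT, pvST, List.isEmpty_nil, if_true]
        rw [pv_ST_ge2 ls 3 (by omega)]
        exact h2
    | false =>
      have hl : l.isEmpty = false := pv_nonblank_isEmpty hB
      constructor
      · refine ⟨k1, ?_⟩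
        simp only [pvAT, pvST, hl, Bool.false_eq_true, if_false]
        rw [h1]
        simp [List.append_assoc]
      · refine ⟨k1, ?_⟩
        simp only [pvAT, pvST, hl, Bool.false_eq_true, if_false]
        rw [h1]
        simp [List.append_assoc, List.replicate]

theorem pv_ST12 (ls : List (List Char)) :
    PySem.Chars.strip (pvST 2 ls) = PySem.Chars.strip (pvST 1 ls) := by
  cases ls with
  | nil => rfl
  | cons l ls =>
    cases hl : l.isEmpty with
    | true =>
      simp only [pvST, hl, if_true]
      rw [pv_ST_ge2 ls 3 (by omega)]
    | false =>
      simp only [pvST, hl, Bool.false_eq_true, if_false]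
      rw [List.append_assoc, List.append_assoc,
        show List.replicate (min 2 2) '\n' = ['\n', '\n'] from rfl,
        show List.replicate (min 1 2) '\n' = ['\n'] from rfl]
      rw [show (['\n', '\n'] : List Char) ++ (l ++ pvST 1 ls)
          = '\n' :: '\n' :: (l ++ pvST 1 ls) from rfl,
        show (['\n'] : List Char) ++ (l ++ pvST 1 ls)
          = '\n' :: (l ++ pvST 1 ls) from rfl]
      rw [pv_strip_cons_ws ('\n' :: (l ++ pvST 1 ls)) (by decide),
        pv_strip_cons_ws (l ++ pvST 1 ls) (by decide)]

theorem pv_head (ls : List (List Char))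
    (hb : ∀ l ∈ ls, (PySem.Chars.strip l).isEmpty = true → l = []) :
    PySem.Chars.strip (pvHA ls) = PySem.Chars.strip (pvST 0 ls) := by
  cases ls with
  | nil => rfl
  | cons l ls =>
    have hb' : ∀ x ∈ ls, (PySem.Chars.strip x).isEmpty = true → x = [] := by
      intro x hx; exact hb x (by simp [hx])
    obtain ⟨⟨k1, h1⟩, ⟨k2, h2⟩⟩ := pv_T ls hb'
    cases hB : (PySem.Chars.strip l).isEmpty with
    | true =>
      have hl : l = [] := hb l (by simp) hB
      subst hl
      simp only [pvHA, pvST, List.isEmpty_nil, if_true]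
      rw [show PySem.Chars.strip (pvAT true ls)
          = PySem.Chars.strip ('\n' :: pvAT true ls) from
          (pv_strip_cons_ws _ (by decide)).symm,
        h2, pv_strip_append_nl, pv_ST12]
    | false =>
      have hl : l.isEmpty = false := pv_nonblank_isEmpty hB
      simp only [pvHA, pvST, hl, Bool.false_eq_true, if_false]
      rw [h1, show (min 0 2) = 0 from rfl]
      simp only [List.replicate_zero, List.nil_append]
      rw [← List.append_assoc, pv_strip_append_nl]

-- lines produced by splitlines contain no line-break character
theorem pv_go_nb (isB : Char → Bool) : ∀ s cur acc,
    (∀ c ∈ cur, isB c = false) →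
    (∀ l ∈ acc, ∀ c ∈ l, isB c = false) →
    ∀ l ∈ PySem.Chars.splitlines.go isB s cur acc, ∀ c ∈ l, isB c = false := by
  intro s cur acc
  induction s, cur, acc using PySem.Chars.splitlines.go.induct isB with
  | case1 cur acc he =>
    intro h1 h2 l hl
    unfold PySem.Chars.splitlines.go at hl
    rw [if_pos he, List.mem_reverse] at hl
    exact h2 l hl
  | case2 cur acc he =>
    intro h1 h2 l hl
    unfold PySem.Chars.splitlines.go at hl
    rw [if_neg he, List.mem_reverse] at hl
    rcases List.mem_cons.mp hl with h | h
    · subst h; intro c hc; exact h1 c (by simpa using hc)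
    · exact h2 l h
  | case3 rest cur acc ih =>
    intro h1 h2
    show ∀ l ∈ PySem.Chars.splitlines.go isB rest [] (cur.reverse :: acc), _
    refine ih (by simp) ?_
    intro l hl
    rcases List.mem_cons.mp hl with h | h
    · subst h; intro c hc; exact h1 c (by simpa using hc)
    · exact h2 l h
  | case4 c rest cur acc hne hB ih =>
    intro h1 h2
    rw [PySem.Chars.splitlines.go.eq_def]
    split
    · rename_i heq; cases heq
    · rename_i r heq
      injection heq with e1 e2; subst e1 e2
      exact (hne r rfl rfl).elim
    · rename_i c' r' heq
      injection heq with e1 e2; subst e1 e2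
      rw [if_pos hB]
      refine ih (by simp) ?_
      intro l hl
      rcases List.mem_cons.mp hl with h | h
      · subst h; intro ch hc; exact h1 ch (by simpa using hc)
      · exact h2 l h
  | case5 c rest cur acc hne hB ih =>
    intro h1 h2
    rw [PySem.Chars.splitlines.go.eq_def]
    split
    · rename_i heq; cases heq
    · rename_i r heq
      injection heq with e1 e2; subst e1 e2
      exact (hne r rfl rfl).elim
    · rename_i c' r' heq
      injection heq with e1 e2; subst e1 e2
      rw [if_neg hB]
      refine ih ?_ h2
      intro ch hc
      rcases List.mem_cons.mp hc with h | h
      · subst h; exact Bool.eq_false_iff.mpr hB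
      · exact h1 ch h

theorem pv_splitlines_no_nl (s : List Char) :
    ∀ l ∈ PySem.Chars.splitlines s, '\n' ∉ l := by
  intro l hl hmem
  unfold PySem.Chars.splitlines at hl
  have := pv_go_nb _ s [] [] (by simp) (by simp) l hl '\n' hmem
  exact absurd this (by decide)

theorem pv_rstrip_no_nl (cl : List Char) (h : '\n' ∉ cl) :
    '\n' ∉ PySem.Chars.rstrip cl := by
  intro hmem
  apply h
  have : '\n' ∈ (List.dropWhile PySem.Chars.isspace cl.reverse) := by
    simpa [PySem.Chars.rstrip] using hmem
  have := (List.dropWhile_sublist (p := PySem.Chars.isspace) (l := cl.reverse)).mem this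
  simpa using this

-- ===== VERDICT (by name: the statement is the Claim_ definition above) =====
theorem normalize_rendered_prompt_py_spec : Claim_equal_normalize_rendered_prompt_py := by
  intro prompt _
  unfold Spec_normalize_rendered_prompt_py normalize_rendered_prompt_py
    normalize_rendered_prompt_py_alt
  dsimp only
  rw [show ∀ s, PySem.Str.strip s = String.ofList (PySem.Chars.strip s.toList) from
    fun _ => rfl]
  apply congrArg
  set base := if prompt == "" then "" else prompt with hbase
  set lines := (PySem.Str.splitlines (PySem.Str.strip base)).map PySem.Str.rstrip with hlines
  have hb : ∀ l ∈ lines.map String.toList,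
      (PySem.Chars.strip l).isEmpty = true → l = [] := by
    intro l hl hblank
    simp only [hlines, List.map_map, List.mem_map, Function.comp] at hl
    obtain ⟨x, _, hx⟩ := hl
    rw [PySem.Str.toList_rstrip] at hx
    subst hx
    exact pv_hb _ hblank
  have hn : ∀ l ∈ lines.map String.toList, '\n' ∉ l := by
    intro l hl
    simp only [hlines, List.map_map, List.mem_map, Function.comp] at hl
    obtain ⟨x, hxmem, hx⟩ := hl
    rw [PySem.Str.toList_rstrip] at hx
    subst hx
    apply pv_rstrip_no_nl
    apply pv_splitlines_no_nl ((PySem.Str.strip base).toList)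
    rw [← PySem.Str.splitlines_map_toList]
    exact List.mem_map_of_mem hxmem
  obtain ⟨r', hr⟩ := pv_scan_join (lines.map String.toList) [] 0 hn
  rw [String.toList_ofList, PySem.Str.toList_join, PySem.Str.toList_join, pv_nl_toList, hr,
    pv_foldA]
  simp only [List.map_nil, List.nil_append]
  rw [pv_HA_spec _ hb]
  exact pv_head _ hb
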